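-- pv_equiv track=rewrite | github.com/kw-pp/algorithm_Study | younghun/week14/test_4_failed.py | solution
-- ===== SOURCE A (Python) =====
-- from collections import defaultdict
--
-- def light_up(graph, light):
--     max_lighthouse = 0
--     for key in graph.keys():
--         if len(graph[key]) > max_lighthouse and key not in light:
--             max_lighthouse = len(graph[key])
--             max_key = key
--     light.append(max_key)
--     light.extend(graph[max_key])
--     return light
--
-- def check_safe(key_list, light):
--     for key in key_list:
--         if key not in light:
--             return False
--     return True
--
-- def solution(n, lighthouse):
--     answer = 0
--     light = []
--     graph = defaultdict(list)
--
--     for i in lighthouse: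
--         graph[i[0]].append(i[1])
--         graph[i[1]].append(i[0])
--
--     while not check_safe(graph.keys(), light):
--         light = light_up(graph, light)
--         answer += 1
--     return answer
-- ===== SOURCE B (Python) =====
-- from collections import defaultdict
--
-- def solution(n, lighthouse):
--     graph = defaultdict(list)
--     for i in lighthouse:
--         graph[i[0]].append(i[1])
--         graph[i[1]].append(i[0])
--     order = sorted(graph, key=lambda k: -len(graph[k]))
--     covered = set()
--     answer = 0
--     for node in order:
--         if node not in covered:
--             answer += 1
--             covered.add(node)
--             covered.update(graph[node])
--     return answer
-- ===== Notes on version B (the rewrite author's own statement) =====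
-- stated objective: alternative
-- what changed: A repeatedly rescans the whole key list (one argmax pass per greedy round plus a check_safe pass) until everything is lit; B sorts the keys once by descending degree (stable, so first-seen wins ties exactly as A's strict '>') and makes a single pass with a covered set.
import Mathlib
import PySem

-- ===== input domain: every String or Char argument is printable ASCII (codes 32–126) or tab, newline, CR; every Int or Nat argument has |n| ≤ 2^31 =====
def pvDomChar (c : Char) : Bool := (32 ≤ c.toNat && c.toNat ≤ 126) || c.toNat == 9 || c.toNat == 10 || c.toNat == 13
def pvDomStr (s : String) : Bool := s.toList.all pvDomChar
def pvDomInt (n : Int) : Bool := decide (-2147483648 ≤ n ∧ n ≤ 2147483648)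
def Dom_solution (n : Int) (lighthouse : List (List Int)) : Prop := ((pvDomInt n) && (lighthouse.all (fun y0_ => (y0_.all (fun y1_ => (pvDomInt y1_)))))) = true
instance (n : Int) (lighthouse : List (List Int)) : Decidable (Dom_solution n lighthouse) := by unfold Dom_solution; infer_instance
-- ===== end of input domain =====

-- B replaces A's repeated full scans of the key list (a greedy argmax pass per round plus a
-- check_safe pass) by one stable sort of the keys on descending degree followed by a single
-- pass with a covered-set; same return value on every input where A does not raise.
-- (A also mutates nothing observable; only the return value is claimed.)

-- ===== PORT A =====
-- shared by both ports: both Pythons build the same defaultdict(list) graph from the edges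
def pvBuildGraph (lighthouse : List (List Int)) : PySem.Dict Int (List Int) :=
  lighthouse.foldl (fun g i =>
    match PySem.List.pyGet? i 0, PySem.List.pyGet? i 1 with
    | some a, some b => (g.modify a [] (· ++ [b])).modify b [] (· ++ [a])
    | _, _ => g)    -- Python raises IndexError on an edge shorter than 2: excluded by Pre_solution
    PySem.Dict.empty

def pvCheckSafe (keyList : List Int) (light : List Int) : Bool :=
  match keyList with
  | [] => true
  | k :: rest => if light.contains k = false then false else pvCheckSafe rest light

def pvLightUpScan (g : PySem.Dict Int (List Int)) (keyList : List Int) (light : List Int)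
    (maxLh : Int) (maxKey : Option Int) : Int × Option Int :=
  match keyList with
  | [] => (maxLh, maxKey)
  | k :: rest =>
      if ((g.getD k []).length : Int) > maxLh ∧ light.contains k = false then
        pvLightUpScan g rest light ((g.getD k []).length : Int) (some k)
      else
        pvLightUpScan g rest light maxLh maxKey

def pvLightUp (g : PySem.Dict Int (List Int)) (light : List Int) : Option (List Int) :=
  match (pvLightUpScan g g.keys light 0 none).2 with
  | none => none    -- Python: UnboundLocalError (never reached from solution: every key has a nonempty list)
  | some u => some (light ++ u :: g.getD u [])

def pvLoop (g : PySem.Dict Int (List Int)) (fuel : Nat) (answer : Int) (light : List Int) : Int :=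
  match fuel with
  | 0 => answer
  | fuel' + 1 =>
      if pvCheckSafe g.keys light then answer
      else
        match pvLightUp g light with
        | none => answer    -- dead: see pvLightUp
        | some light' => pvLoop g fuel' (answer + 1) light'

def solution (n : Int) (lighthouse : List (List Int)) : Int :=
  let g := pvBuildGraph lighthouse
  pvLoop g (g.keys.length + 1) 0 []

-- ===== PORT B =====
def pvCoverStep (g : PySem.Dict Int (List Int)) (st : Int × PySem.Set Int) (node : Int) :
    Int × PySem.Set Int :=
  if PySem.Set.contains st.2 node then st
  else (st.1 + 1, PySem.Set.update (PySem.Set.add st.2 node) (g.getD node []))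

def solution_alt (n : Int) (lighthouse : List (List Int)) : Int :=
  let g := pvBuildGraph lighthouse
  let order := PySem.List.sorted g.keys (fun k => -((g.getD k []).length : Int)) false
  (order.foldl (pvCoverStep g) (0, PySem.Set.empty)).1

-- ===== PRECONDITION & SPEC =====
-- Pre_ excludes exactly the inputs on which A raises IndexError: an edge list with fewer than 2 entries.
def Pre_solution (n : Int) (lighthouse : List (List Int)) : Prop :=
  ∀ i ∈ lighthouse, 2 ≤ i.length
instance (n : Int) (lighthouse : List (List Int)) : Decidable (Pre_solution n lighthouse) := by
  unfold Pre_solution; infer_instance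
def pvWitness_solution : Int × List (List Int) := (4, [[1, 2], [1, 3], [2, 3]])

def Spec_solution (n : Int) (lighthouse : List (List Int)) (out : Int) : Prop := out = solution_alt n lighthouse
instance (n : Int) (lighthouse : List (List Int)) (out : Int) : Decidable (Spec_solution n lighthouse out) := by unfold Spec_solution; infer_instance

-- ===== CLAIM (what is proved, stated in full; the proofs are below) =====
def Claim_equal_solution : Prop := ∀ (n : Int) (lighthouse : List (List Int)), Dom_solution n lighthouse → Pre_solution n lighthouse → Spec_solution n lighthouse (solution n lighthouse)

-- ===== LEMMAS AND PROOFS =====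

-- the common "first maximum wins" accumulator both programs realise
def pickStep (key : Int → Int) (P : Int → Bool) (acc : Option Int) (x : Int) : Option Int :=
  match acc with
  | none => if P x then some x else none
  | some b => if P x = true ∧ key x < key b then some x else some b

-- `find?` through a stable insertion: inserting x into a key-sorted list moves the first
-- P-element exactly as pickStep does
theorem find?_insertBy (key : Int → Int) (P : Int → Bool) (x : Int) (L : List Int)
    (h : L.Pairwise (fun a b => key a ≤ key b)) :
    (PySem.List.insertBy (fun a b => decide (key a < key b)) x L).find? P
      = pickStep key P (L.find? P) x := by
  induction L with
  | nil =>
    simp only [PySem.List.insertBy, List.find?_nil, pickStep]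
    cases hPx : P x
    · rw [List.find?_cons_of_neg (by simp [hPx]), List.find?_nil]
      simp
    · rw [List.find?_cons_of_pos hPx]
      simp
  | cons y ys ih =>
    have hpw := h
    rw [List.pairwise_cons] at hpw
    simp only [PySem.List.insertBy]
    by_cases hxy : key x < key y
    · rw [if_pos (decide_eq_true hxy)]
      by_cases hPx : P x = true
      · rw [List.find?_cons_of_pos hPx]
        cases hfy : (y :: ys).find? P with
        | none => simp [pickStep, hfy, hPx]
        | some b =>
          have hb : b ∈ y :: ys := List.mem_of_find?_eq_some hfy
          have hyb : key y ≤ key b := by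
            rcases List.mem_cons.mp hb with rfl | hb'
            · exact le_refl _
            · exact hpw.1 b hb'
          simp [pickStep, hfy, hPx, lt_of_lt_of_le hxy hyb]
      · rw [List.find?_cons_of_neg hPx]
        cases hfy : (y :: ys).find? P with
        | none => simp [pickStep, hfy, hPx]
        | some b => simp [pickStep, hfy, hPx]
    · rw [if_neg (by simp [hxy])]
      by_cases hPy : P y = true
      · rw [List.find?_cons_of_pos hPy, List.find?_cons_of_pos hPy]
        cases hPx : P x <;> simp [pickStep, hxy, hPx]
      · rw [List.find?_cons_of_neg hPy, List.find?_cons_of_neg hPy]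
        exact ih hpw.2

-- find? over the stable sorted order = the left-to-right first-max accumulator over the keys
theorem find?_sorted_eq_foldl_pickStep (key : Int → Int) (P : Int → Bool) (xs : List Int) :
    (PySem.List.sorted xs key false).find? P = xs.foldl (pickStep key P) none := by
  induction xs using List.reverseRecOn with
  | nil => simp [PySem.List.sorted]
  | append_singleton xs x ih =>
    rw [PySem.List.sorted_eq_foldl_insertBy, List.foldl_append, List.foldl_append]
    rw [← PySem.List.sorted_eq_foldl_insertBy]
    simp only [List.foldl_cons, List.foldl_nil]
    rw [find?_insertBy key P x _ (PySem.List.sorted_pairwise xs key), ih]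

-- A's light_up scan computes the same accumulator
theorem scan_eq (g : PySem.Dict Int (List Int)) (light : List Int) :
    ∀ (ks : List Int) (m : Int) (mk : Option Int),
    (∀ k ∈ ks, 1 ≤ ((g.getD k []).length : Int)) →
    (mk = none → m = 0) →
    (∀ b, mk = some b → m = ((g.getD b []).length : Int)) →
    (pvLightUpScan g ks light m mk).2
      = ks.foldl (pickStep (fun k => -((g.getD k []).length : Int)) (fun k => !light.contains k)) mk := by
  intro ks
  induction ks with
  | nil => intro m mk _ _ _; simp [pvLightUpScan]
  | cons k rest ih =>
    intro m mk hdeg hnone hsome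
    have hk : 1 ≤ ((g.getD k []).length : Int) := hdeg k (by simp)
    have hrest : ∀ k' ∈ rest, 1 ≤ ((g.getD k' []).length : Int) := fun k' hk' => hdeg k' (by simp [hk'])
    simp only [pvLightUpScan, List.foldl_cons]
    cases mk with
    | none =>
      have hm : m = 0 := hnone rfl
      by_cases hc : light.contains k = false
      · have : ((g.getD k []).length : Int) > m ∧ light.contains k = false := ⟨by omega, hc⟩
        rw [if_pos this]
        rw [ih _ _ hrest (by simp) (by intro b hb; injection hb with hb; subst hb; rfl)]
        congr 1
        simp only [pickStep]
        rw [if_pos (by rw [hc]; rfl)]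
      · have : ¬(((g.getD k []).length : Int) > m ∧ light.contains k = false) := fun h => hc h.2
        rw [if_neg this]
        rw [ih _ _ hrest hnone hsome]
        have hct : light.contains k = true := by revert hc; cases light.contains k <;> simp
        congr 1
        simp only [pickStep]
        rw [if_neg (by rw [hct]; exact Bool.false_ne_true)]
    | some b =>
      have hm : m = ((g.getD b []).length : Int) := hsome b rfl
      by_cases hcond : ((g.getD k []).length : Int) > m ∧ light.contains k = false
      · rw [if_pos hcond]
        rw [ih _ _ hrest (by simp) (by intro b' hb'; injection hb' with hb'; subst hb'; rfl)]
        have h1 : (!light.contains k) = true := by rw [hcond.2]; rfl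
        have h2 : -((g.getD k []).length : Int) < -((g.getD b []).length : Int) := by omega
        congr 1
        simp only [pickStep]
        rw [if_pos ⟨h1, h2⟩]
      · rw [if_neg hcond]
        rw [ih _ _ hrest hnone hsome]
        have : ¬((!light.contains k) = true ∧
            -((g.getD k []).length : Int) < -((g.getD b []).length : Int)) := by
          intro ⟨hp, hlt⟩
          exact hcond ⟨by omega, by revert hp; cases light.contains k <;> simp⟩
        congr 1
        simp only [pickStep]
        rw [if_neg this]

theorem checkSafe_iff (ks light : List Int) :
    pvCheckSafe ks light = true ↔ ∀ k ∈ ks, light.contains k = true := by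
  induction ks with
  | nil => simp [pvCheckSafe]
  | cons k rest ih =>
    simp only [pvCheckSafe]
    by_cases hc : light.contains k = false
    · rw [if_pos hc]
      constructor
      · intro h; cases h
      · intro h
        rw [h k (by simp)] at hc
        cases hc
    · have hk : light.contains k = true := by revert hc; cases light.contains k <;> simp
      rw [if_neg (by rw [hk]; simp)]
      rw [ih]
      constructor
      · intro h k' hk'
        rcases List.mem_cons.mp hk' with rfl | hk''
        · exact hk
        · exact h k' hk''
      · intro h k' hk'
        exact h k' (List.mem_cons_of_mem _ hk')

-- B's fold is the identity once everything is covered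
theorem foldB_covered (g : PySem.Dict Int (List Int)) :
    ∀ (L : List Int) (a : Int) (cov : PySem.Set Int),
    (∀ k ∈ L, PySem.Set.contains cov k = true) →
    L.foldl (pvCoverStep g) (a, cov) = (a, cov) := by
  intro L
  induction L with
  | nil => intro a cov _; simp
  | cons k rest ih =>
    intro a cov h
    have hk := h k (by simp)
    simp only [List.foldl_cons, pvCoverStep, hk, if_true]
    exact ih a cov (fun k' hk' => h k' (by simp [hk']))

-- one round of B's fold: finding the first uncovered node adds one and covers its closed neighbourhood
theorem foldB_step (g : PySem.Dict Int (List Int)) :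
    ∀ (L : List Int) (a : Int) (cov : PySem.Set Int) (u : Int),
    L.find? (fun k => !PySem.Set.contains cov k) = some u →
    L.foldl (pvCoverStep g) (a, cov)
      = L.foldl (pvCoverStep g) (a + 1, PySem.Set.update (PySem.Set.add cov u) (g.getD u [])) := by
  intro L
  induction L with
  | nil => intro a cov u h; cases h
  | cons k rest ih =>
    intro a cov u h
    by_cases hc : PySem.Set.contains cov k = true
    · have hfk : (!PySem.Set.contains cov k) = false := by rw [hc]; rfl
      rw [List.find?_cons_of_neg (by rw [hfk]; exact Bool.false_ne_true)] at h
      have hc' : PySem.Set.contains (PySem.Set.update (PySem.Set.add cov u) (g.getD u [])) k = true := by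
        rw [PySem.Set.contains_iff] at hc ⊢
        rw [PySem.Set.mem_update]
        left; rw [PySem.Set.mem_add]; left; exact hc
      simp only [List.foldl_cons, pvCoverStep, hc, hc', if_true]
      exact ih a cov u h
    · have hfk : (!PySem.Set.contains cov k) = true := by revert hc; cases PySem.Set.contains cov k <;> simp
      rw [List.find?_cons_of_pos (p := fun k => !PySem.Set.contains cov k) hfk] at h
      injection h with h; subst h
      have hcF : PySem.Set.contains cov k = false := by revert hc; cases PySem.Set.contains cov k <;> simp
      have hc' : PySem.Set.contains (PySem.Set.update (PySem.Set.add cov k) (g.getD k [])) k = true := by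
        rw [PySem.Set.contains_iff, PySem.Set.mem_update]
        left; rw [PySem.Set.mem_add]; right; rfl
      simp only [List.foldl_cons, pvCoverStep, hcF, hc', if_true, if_false]
      simp

-- the uncovered-key count, the loop's termination measure
def pvUC (g : PySem.Dict Int (List Int)) (light : List Int) : Nat :=
  (g.keys.filter (fun k => !light.contains k)).length

theorem filter_sublist_of_imp {p q : Int → Bool} :
    ∀ (l : List Int), (∀ a, p a = true → q a = true) → (l.filter p).Sublist (l.filter q) := by
  intro l h
  induction l with
  | nil => simp
  | cons x xs ih =>
    by_cases hp : p x = true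
    · rw [List.filter_cons_of_pos hp, List.filter_cons_of_pos (h x hp)]
      exact ih.cons₂ x
    · rw [List.filter_cons_of_neg hp]
      by_cases hq : q x = true
      · rw [List.filter_cons_of_pos hq]; exact ih.cons x
      · rw [List.filter_cons_of_neg hq]; exact ih

-- The heart: A's while-loop from any state equals B's single pass, by induction on fuel
theorem loop_eq_fold (g : PySem.Dict Int (List Int))
    (hdeg : ∀ k ∈ g.keys, 1 ≤ ((g.getD k []).length : Int)) :
    ∀ (fuel : Nat) (light : List Int) (cov : PySem.Set Int) (a : Int),
    (∀ k : Int, light.contains k = PySem.Set.contains cov k) →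
    pvUC g light < fuel →
    pvLoop g fuel a light
      = ((PySem.List.sorted g.keys (fun k => -((g.getD k []).length : Int)) false).foldl
          (pvCoverStep g) (a, cov)).1 := by
  intro fuel
  induction fuel with
  | zero => intro light cov a _ hf; omega
  | succ fuel ih =>
    intro light cov a hmem hf
    set key : Int → Int := fun k => -((g.getD k []).length : Int) with hkey
    set L := PySem.List.sorted g.keys key false with hL
    by_cases hsafe : pvCheckSafe g.keys light = true
    · rw [pvLoop, if_pos hsafe]
      rw [foldB_covered g L a cov ?_]
      intro k hk
      rw [← hmem k]
      exact (checkSafe_iff _ _).mp hsafe k ((PySem.List.mem_sorted _ _ _ _).mp hk)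
    · -- some key is uncovered
      have hex : ∃ k ∈ g.keys, light.contains k = false := by
        by_contra hno
        push_neg at hno
        exact hsafe ((checkSafe_iff _ _).mpr (fun k hk => by
          have := hno k hk
          revert this; cases light.contains k <;> simp))
      obtain ⟨w, hw, hwun⟩ := hex
      have hPfun : (fun k => !light.contains k) = (fun k => !PySem.Set.contains cov k) := by
        funext k; rw [hmem k]
      -- find? on L succeeds
      have hfind : ∃ u, L.find? (fun k => !light.contains k) = some u := by
        cases hfu : L.find? (fun k => !light.contains k) with
        | some u => exact ⟨u, rfl⟩
        | none =>
          rw [List.find?_eq_none] at hfu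
          have hwL : w ∈ L := (PySem.List.mem_sorted _ _ _ _).mpr hw
          exact absurd (by rw [hwun]; rfl) (hfu w hwL)
      obtain ⟨u, hu⟩ := hfind
      have huP : (!light.contains u) = true := List.find?_some (p := fun k => !light.contains k) hu
      have huUnc : light.contains u = false := by
        revert huP; cases light.contains u <;> simp
      have huMem : u ∈ g.keys := (PySem.List.mem_sorted _ _ _ _).mp (List.mem_of_find?_eq_some hu)
      -- A side: the scan returns u
      have hscan : (pvLightUpScan g g.keys light 0 none).2 = some u := by
        rw [scan_eq g light g.keys 0 none hdeg (fun _ => rfl) (by intro b hb; cases hb)]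
        rw [← find?_sorted_eq_foldl_pickStep key (fun k => !light.contains k) g.keys]
        exact hu
      have hlu : pvLightUp g light = some (light ++ u :: g.getD u []) := by
        rw [pvLightUp, hscan]
      rw [pvLoop, if_neg (by simp [hsafe]), hlu]
      -- B side: one step of the fold
      rw [foldB_step g L a cov u (by rw [← hPfun]; exact hu)]
      -- apply IH to the new state
      set light' := light ++ u :: g.getD u [] with hlight'
      set cov' := PySem.Set.update (PySem.Set.add cov u) (g.getD u []) with hcov'
      apply ih light' cov' (a + 1) ?_ ?_
      · intro k
        have hl' : light'.contains k = true ↔ (k ∈ light ∨ k = u ∨ k ∈ g.getD u []) := by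
          simp [hlight']
        have hcv' : PySem.Set.contains cov' k = true ↔ (k ∈ cov ∨ k = u ∨ k ∈ g.getD u []) := by
          rw [hcov', PySem.Set.contains_iff, PySem.Set.mem_update, PySem.Set.mem_add]
          tauto
        have hlc : k ∈ light ↔ k ∈ cov := by
          have hmk := hmem k
          constructor
          · intro hkl
            have h1 : light.contains k = true := by simpa using hkl
            rw [hmk] at h1
            exact (PySem.Set.contains_iff _ _).mp h1
          · intro hkc
            have h1 : PySem.Set.contains cov k = true := (PySem.Set.contains_iff _ _).mpr hkc
            rw [← hmk] at h1
            simpa using h1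
        rw [Bool.eq_iff_iff, hl', hcv']
        tauto
      · -- strict decrease of the uncovered count
        have hsub : ((g.keys.filter (fun k => !light'.contains k)).Sublist
            (g.keys.filter (fun k => !light.contains k))) := by
          apply filter_sublist_of_imp
          intro x hx
          have : light'.contains x = false := by revert hx; cases light'.contains x <;> simp
          have hxl : light.contains x = false := by
            by_contra hxc
            have hxc' : light.contains x = true := by revert hxc; cases light.contains x <;> simp
            have : light'.contains x = true := by
              simp only [hlight', List.contains_append, hxc', Bool.true_or]
            rw [this] at *; simp_all
          rw [hxl]; rfl
        have hle : pvUC g light' ≤ pvUC g light := hsub.length_le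
        have hne : pvUC g light' ≠ pvUC g light := by
          intro heq
          have heql := hsub.eq_of_length heq
          have huIn : u ∈ g.keys.filter (fun k => !light.contains k) := by
            rw [List.mem_filter]
            exact ⟨huMem, by rw [huUnc]; rfl⟩
          rw [← heql] at huIn
          rw [List.mem_filter] at huIn
          have : light'.contains u = true := by
            simp only [hlight', List.contains_append, List.contains_cons, beq_self_eq_true,
              Bool.true_or, Bool.or_true]
          rw [this] at huIn
          simp at huIn
        omega

-- every key of the built graph carries a nonempty adjacency list
theorem build_deg : ∀ (lh : List (List Int)) (g : PySem.Dict Int (List Int)),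
    (∀ k ∈ g.keys, 1 ≤ ((g.getD k []).length : Int)) →
    ∀ k ∈ (lh.foldl (fun g i =>
        match PySem.List.pyGet? i 0, PySem.List.pyGet? i 1 with
        | some a, some b => (g.modify a [] (· ++ [b])).modify b [] (· ++ [a])
        | _, _ => g) g).keys, 1 ≤ (((lh.foldl (fun g i =>
        match PySem.List.pyGet? i 0, PySem.List.pyGet? i 1 with
        | some a, some b => (g.modify a [] (· ++ [b])).modify b [] (· ++ [a])
        | _, _ => g) g).getD k []).length : Int) := by
  intro lh
  induction lh with
  | nil => intro g hg k hk; simpa using hg k hk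
  | cons i rest ih =>
    intro g hg
    simp only [List.foldl_cons]
    apply ih
    cases h0 : PySem.List.pyGet? i 0 with
    | none => simpa [h0] using hg
    | some a =>
      cases h1 : PySem.List.pyGet? i 1 with
      | none => simpa [h0, h1] using hg
      | some b =>
        simp only [h0, h1]
        intro k hk
        rw [PySem.Dict.keys_modify, PySem.Dict.mem_keys_insert] at hk
        rw [PySem.Dict.getD_modify]
        rcases hk with rfl | hk
        · rw [if_pos rfl]; simp
        · by_cases hkb : k = b
          · rw [if_pos hkb]; simp
          · rw [if_neg hkb]
            rw [PySem.Dict.keys_modify, PySem.Dict.mem_keys_insert] at hk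
            rw [PySem.Dict.getD_modify]
            rcases hk with rfl | hk
            · rw [if_pos rfl]; simp
            · by_cases hka : k = a
              · rw [if_pos hka]; simp
              · rw [if_neg hka]; exact hg k hk

-- ===== VERDICT (by name: the statement is the Claim_ definition above) =====
theorem solution_spec : Claim_equal_solution := by
  intro n lighthouse _ _
  unfold Spec_solution solution solution_alt
  set g := pvBuildGraph lighthouse with hg
  have hdeg : ∀ k ∈ g.keys, 1 ≤ ((g.getD k []).length : Int) := by
    apply build_deg lighthouse PySem.Dict.empty
    intro k hk
    simp [PySem.Dict.keys_empty] at hk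
  apply loop_eq_fold g hdeg
  · intro k
    simp [PySem.Set.contains_eq_listContains, PySem.Set.empty]
  · have := List.length_filter_le (fun k => !([] : List Int).contains k) g.keys
    unfold pvUC
    omega
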